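-- pv_equiv track=rewrite | github.com/shanif3/Early-Pregnancy-Oral-Microbiome | Analysis/create_mimic_tree/main.py | create_list_of_names
-- ===== SOURCE A (Python) =====
-- def create_list_of_names(list_leaves):
--     """
--     Fix taxa names for tree plot.
--     :param list_leaves: List of leaves names without the initials (list).
--     :return: Corrected list taxa names.
--     """
--     list_lens = [len(i.split(";")) for i in list_leaves]
--     otu_train_cols = list()
--     for i, j in zip(list_leaves, list_lens):
--
--         if j == 1:
--             updated = "k__" + i.split(";")[0]
--
--         elif j == 2:
--             updated = "k__" + i.split(";")[0] + ";" + "p__" + i.split(";")[1]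
--
--         elif j == 3:
--             updated = "k__" + i.split(";")[0] + ";" + "p__" + i.split(";")[1] + ";" + "c__" + \
--                       i.split(";")[2]
--         elif j == 4:
--             updated = "k__" + i.split(";")[0] + ";" + "p__" + i.split(";")[1] + ";" + "c__" + i.split(";")[
--                 2] + ";" + "o__" + i.split(";")[3]
--
--         elif j == 5:
--             updated = "k__" + i.split(";")[0] + ";" + "p__" + i.split(";")[1] + ";" + "c__" + i.split(";")[
--                 2] + ";" + "o__" + i.split(";")[3] + ";" + "f__" + i.split(";")[4]
--
--         elif j == 6:
--             updated = "k__" + i.split(";")[0] + ";" + "p__" + i.split(";")[1] + ";" + "c__" + i.split(";")[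
--                 2] + ";" + "o__" + i.split(";")[3] + ";" + "f__" + i.split(";")[4] + ";" + "g__" + \
--                       i.split(";")[5]
--
--         elif j == 7:
--             updated = "k__" + i.split(";")[0] + ";" + "p__" + i.split(";")[1] + ";" + "c__" + i.split(";")[
--                 2] + ";" + "o__" + i.split(";")[3] + ";" + "f__" + i.split(";")[4] + ";" + "g__" + i.split(";")[
--                           5] + ";" + "s__" + i.split(";")[6]
--
--         elif j == 8:
--             updated = "k__" + i.split(";")[0] + ";" + "p__" + i.split(";")[1] + ";" + "c__" + i.split(";")[
--                 2] + ";" + "o__" + i.split(";")[3] + ";" + "f__" + i.split(";")[4] + ";" + "g__" + i.split(";")[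
--                           5] + ";" + "s__" + i.split(";")[6] + ";" + "t__" + i.split(";")[7]
--
--         otu_train_cols.append(updated)
--     return otu_train_cols
-- ===== SOURCE B (Python) =====
-- PREFIXES = ["k__", "p__", "c__", "o__", "f__", "g__", "s__", "t__"]
--
--
-- def create_list_of_names(list_leaves):
--     out = []
--     for leaf in list_leaves:
--         parts = leaf.split(";")
--         out.append(";".join(p + x for p, x in zip(PREFIXES, parts)))
--     return out
-- ===== Notes on version B (the rewrite author's own statement) =====
-- stated objective: simpler
-- what changed: Replaces A's eight hand-written elif branches (each re-splitting the string and concatenating indexed parts) by a single zip of the split parts with a fixed rank-prefix table followed by one ';'.join per leaf.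
import Mathlib
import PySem

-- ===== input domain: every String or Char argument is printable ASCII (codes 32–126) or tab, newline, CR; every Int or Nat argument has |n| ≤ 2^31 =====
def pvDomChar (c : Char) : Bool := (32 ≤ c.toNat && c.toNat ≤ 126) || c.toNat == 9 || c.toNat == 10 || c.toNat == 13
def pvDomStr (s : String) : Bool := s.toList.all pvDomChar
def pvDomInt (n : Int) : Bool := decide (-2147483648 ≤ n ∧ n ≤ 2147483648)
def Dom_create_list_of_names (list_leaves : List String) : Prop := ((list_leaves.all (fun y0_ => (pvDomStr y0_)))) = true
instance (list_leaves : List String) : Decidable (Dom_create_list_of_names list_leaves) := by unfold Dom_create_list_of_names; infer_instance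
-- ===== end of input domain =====

-- B replaces A's eight elif branches by one zip of the split parts with a fixed rank-prefix
-- table and a single join per leaf (objective: simpler).


-- ===== PORT A =====
-- i.split(";") : ";" is non-empty, so Python's split never raises; split? is always `some` here.
def pySplitSemi (s : String) : List String := (PySem.Str.split? s ";").getD []

-- The if/elif chain of A; `st` is the incoming value of the Python variable `updated`
-- (none = still unbound).  Every index sp.getD k "" is in range in its branch (k < j = sp.length),
-- so getD is exact for Python's sp[k] there.
def updA (i : String) (j : Nat) (st : Option String) : Option String :=
  let sp := pySplitSemi i
  if j = 1 then some ("k__" ++ sp.getD 0 "")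
  else if j = 2 then some ("k__" ++ sp.getD 0 "" ++ ";" ++ "p__" ++ sp.getD 1 "")
  else if j = 3 then some ("k__" ++ sp.getD 0 "" ++ ";" ++ "p__" ++ sp.getD 1 "" ++ ";" ++ "c__" ++ sp.getD 2 "")
  else if j = 4 then some ("k__" ++ sp.getD 0 "" ++ ";" ++ "p__" ++ sp.getD 1 "" ++ ";" ++ "c__" ++ sp.getD 2 "" ++ ";" ++ "o__" ++ sp.getD 3 "")
  else if j = 5 then some ("k__" ++ sp.getD 0 "" ++ ";" ++ "p__" ++ sp.getD 1 "" ++ ";" ++ "c__" ++ sp.getD 2 "" ++ ";" ++ "o__" ++ sp.getD 3 "" ++ ";" ++ "f__" ++ sp.getD 4 "")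
  else if j = 6 then some ("k__" ++ sp.getD 0 "" ++ ";" ++ "p__" ++ sp.getD 1 "" ++ ";" ++ "c__" ++ sp.getD 2 "" ++ ";" ++ "o__" ++ sp.getD 3 "" ++ ";" ++ "f__" ++ sp.getD 4 "" ++ ";" ++ "g__" ++ sp.getD 5 "")
  else if j = 7 then some ("k__" ++ sp.getD 0 "" ++ ";" ++ "p__" ++ sp.getD 1 "" ++ ";" ++ "c__" ++ sp.getD 2 "" ++ ";" ++ "o__" ++ sp.getD 3 "" ++ ";" ++ "f__" ++ sp.getD 4 "" ++ ";" ++ "g__" ++ sp.getD 5 "" ++ ";" ++ "s__" ++ sp.getD 6 "")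
  else if j = 8 then some ("k__" ++ sp.getD 0 "" ++ ";" ++ "p__" ++ sp.getD 1 "" ++ ";" ++ "c__" ++ sp.getD 2 "" ++ ";" ++ "o__" ++ sp.getD 3 "" ++ ";" ++ "f__" ++ sp.getD 4 "" ++ ";" ++ "g__" ++ sp.getD 5 "" ++ ";" ++ "s__" ++ sp.getD 6 "" ++ ";" ++ "t__" ++ sp.getD 7 "")
  else st

-- One loop iteration: update `updated`, then append it.  When `updated` is still unbound
-- (state none) Python raises UnboundLocalError; those inputs are excluded by Pre_, the
-- `.getD ""` there is never reached inside Pre_.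
def stepA (st : Option String × List String) (ij : String × Nat) : Option String × List String :=
  let updated := updA ij.1 ij.2 st.1
  (updated, st.2 ++ [updated.getD ""])

def create_list_of_names (list_leaves : List String) : List String :=
  let list_lens := list_leaves.map (fun i => (pySplitSemi i).length)
  (List.foldl stepA (none, []) (list_leaves.zip list_lens)).2

-- ===== PORT B =====
def PREFIXES : List String := ["k__", "p__", "c__", "o__", "f__", "g__", "s__", "t__"]

def altElem (leaf : String) : String :=
  PySem.Str.join ";" ((PREFIXES.zip (pySplitSemi leaf)).map (fun pq => pq.1 ++ pq.2))

def create_list_of_names_alt (list_leaves : List String) : List String :=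
  list_leaves.map altElem

-- ===== PRECONDITION & SPEC =====
-- Pre_ excludes lists containing a leaf with more than 8 ';'-separated components: the scheme
-- has exactly 8 ranks, so such a leaf is malformed — A raises UnboundLocalError when it comes
-- first and otherwise repeats the previous leaf's leftover 'updated' value, B truncates to the
-- 8 known ranks; neither value is specified for this corner.
def Pre_create_list_of_names (list_leaves : List String) : Prop :=
  ∀ s ∈ list_leaves, (pySplitSemi s).length ≤ 8
instance (list_leaves : List String) : Decidable (Pre_create_list_of_names list_leaves) := by unfold Pre_create_list_of_names; infer_instance

def pvWitness_create_list_of_names : List String := ["Bacteria;Firmicutes", "Bacteria"]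

def Spec_create_list_of_names (list_leaves : List String) (out : List String) : Prop :=
  out = create_list_of_names_alt list_leaves
instance (list_leaves : List String) (out : List String) : Decidable (Spec_create_list_of_names list_leaves out) := by unfold Spec_create_list_of_names; infer_instance

-- ===== CLAIM =====
def Claim_equal_create_list_of_names : Prop := ∀ (list_leaves : List String), Dom_create_list_of_names list_leaves → Pre_create_list_of_names list_leaves → Spec_create_list_of_names list_leaves (create_list_of_names list_leaves)

-- ===== LEMMAS AND PROOFS =====
theorem joinS_singleton (sep p : String) : PySem.Str.join sep [p] = p := by
  apply String.ext; simp [PySem.Str.join, PySem.Chars.join_singleton]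

theorem joinS_cons_cons (sep p q : String) (rest : List String) :
    PySem.Str.join sep (p :: q :: rest) = p ++ sep ++ PySem.Str.join sep (q :: rest) := by
  apply String.ext
  simp [PySem.Str.join, PySem.Chars.join_cons_cons, String.toList_ofList, String.toList_append]

theorem go_len (sep : List Char) : ∀ (fuel : Nat) (l cur : List Char) (acc : List (List Char)),
    acc.length < (PySem.Chars.splitOn.go sep fuel l cur acc).length := by
  intro fuel
  induction fuel with
  | zero => intro l cur acc; simp [PySem.Chars.splitOn.go]
  | succ n ih =>
    intro l cur acc
    cases l with
    | nil => simp [PySem.Chars.splitOn.go]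
    | cons c rest =>
      rw [PySem.Chars.splitOn.go]
      split
      · exact Nat.lt_of_lt_of_le (by simp) (Nat.le_of_lt (ih _ _ _))
      · exact ih _ _ _

theorem pySplitSemi_ne_nil (s : String) : pySplitSemi s ≠ [] := by
  have h := go_len (";".toList) (s.toList.length + 1) s.toList [] []
  unfold pySplitSemi PySem.Str.split? PySem.Chars.split? PySem.Chars.splitOn
  intro hc
  split at hc
  · exact absurd (by assumption : (";".toList.isEmpty) = true) (by decide)
  · simp only [Option.getD_some, Option.map_some] at hc
    rw [List.map_eq_nil_iff.mp hc] at h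
    simp at h

theorem elem_eq (s : String) (st : Option String)
    (h8 : (pySplitSemi s).length ≤ 8) :
    updA s (pySplitSemi s).length st = some (altElem s) := by
  have hne := pySplitSemi_ne_nil s
  unfold updA altElem PREFIXES
  rcases hp : pySplitSemi s with _ | ⟨a, _ | ⟨b, _ | ⟨c, _ | ⟨d, _ | ⟨e, _ | ⟨f, _ | ⟨g, _ | ⟨t, _ | ⟨x, rest⟩⟩⟩⟩⟩⟩⟩⟩⟩
  · exact absurd hp hne
  · simp [joinS_singleton]
  · simp [joinS_cons_cons, joinS_singleton, ← String.append_assoc]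
  · simp [joinS_cons_cons, joinS_singleton, ← String.append_assoc]
  · simp [joinS_cons_cons, joinS_singleton, ← String.append_assoc]
  · simp [joinS_cons_cons, joinS_singleton, ← String.append_assoc]
  · simp [joinS_cons_cons, joinS_singleton, ← String.append_assoc]
  · simp [joinS_cons_cons, joinS_singleton, ← String.append_assoc]
  · simp [joinS_cons_cons, joinS_singleton, ← String.append_assoc]
  · rw [hp] at h8; simp at h8; omega

theorem loop_eq (l : List String) (u : Option String) (acc : List String)
    (h : ∀ s ∈ l, (pySplitSemi s).length ≤ 8) :
    (List.foldl stepA (u, acc) (l.zip (l.map (fun i => (pySplitSemi i).length)))).2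
      = acc ++ l.map altElem := by
  induction l generalizing u acc with
  | nil => simp
  | cons s t ih =>
    simp only [List.map_cons, List.zip_cons_cons, List.foldl_cons, List.map_cons]
    rw [show stepA (u, acc) (s, (pySplitSemi s).length)
          = (some (altElem s), acc ++ [altElem s]) by
        simp [stepA, elem_eq s u (h s (by simp))]]
    rw [ih _ _ (fun x hx => h x (by simp [hx]))]
    simp

-- ===== VERDICT =====
theorem create_list_of_names_spec : Claim_equal_create_list_of_names := by
  intro l _hd hp
  unfold Spec_create_list_of_names create_list_of_names create_list_of_names_alt
  simpa using loop_eq l none [] hp
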